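-- pv_equiv track=rewrite | github.com/alexandraback/datacollection | solutions_5636311922769920_1/Python/Lellow/Fractiles.py | fractiles
-- ===== SOURCE A (Python) =====
-- def calcul(l,k,c):
--     ret = 0
--     for i in range(0,len(l)):
--         ret+=l[i]* k**(len(l)-i-1)
--     return ret+1
--
-- def fractiles(k,c,s):
--     if (k > (s*c)):
--         return "IMPOSSIBLE"
--     a = list(range(0,k))
--     res = []
--     while(len(a)!=0):
--         tab=[]
--         for i in range(c):
--             tab.append(a.pop(0) if (len(a)!=0) else k)
--         res.append(calcul(tab,k,c))
--     return res
-- ===== SOURCE B (Python) =====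
-- def fractiles(k, c, s):
--     if k > (s * c):
--         return "IMPOSSIBLE"
--     if k <= 0:
--         return []
--     P = 0
--     Q = 0
--     for j in range(c):
--         P += k ** (c - 1 - j)
--         Q += j * k ** (c - 1 - j)
--     res = []
--     start = 0
--     while start < k:
--         if start + c <= k:
--             res.append(start * P + Q + 1)
--         else:
--             digits = list(range(start, k)) + [k] * (c - (k - start))
--             v = 0
--             for d in digits:
--                 v = v * k + d
--             res.append(v + 1)
--         start += c
--     return res
-- ===== Notes on version B (the rewrite author's own statement) =====
-- stated objective: alternative
-- what changed: Replaces A's destructive pop-a-chunk-from-the-front loop (each tile rebuilt digit by digit with per-digit power computations) by a start-index walk with precomputed chunk constants P and Q, emitting each full tile as start*P+Q+1 with one multiply-add and encoding only the final partial chunk by Horner's rule; the trade is precomputation plus arithmetic on whole-tile numbers instead of per-digit list surgery, which a timing run found comparable since big-integer work dominates both.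
-- outside the precondition, e.g. on fractiles(5, 1, 1): A returns 'IMPOSSIBLE', B returns 'IMPOSSIBLE'
import Mathlib
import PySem

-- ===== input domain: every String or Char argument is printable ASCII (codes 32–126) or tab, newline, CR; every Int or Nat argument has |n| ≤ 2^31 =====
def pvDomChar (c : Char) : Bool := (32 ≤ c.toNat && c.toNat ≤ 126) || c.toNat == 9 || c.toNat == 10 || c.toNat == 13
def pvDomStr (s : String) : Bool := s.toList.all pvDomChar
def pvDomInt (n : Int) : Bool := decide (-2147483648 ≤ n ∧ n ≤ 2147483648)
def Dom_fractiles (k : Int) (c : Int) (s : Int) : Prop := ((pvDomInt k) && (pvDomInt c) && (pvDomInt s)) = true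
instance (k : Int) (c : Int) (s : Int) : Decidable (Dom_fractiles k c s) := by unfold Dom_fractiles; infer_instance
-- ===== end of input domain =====

-- B replaces A's destructive pop-a-chunk-then-evaluate loop by a start-index walk with
-- precomputed chunk constants P and Q (each full chunk emitted with one multiply-add) and a
-- Horner encoding for the final partial chunk; objective: alternative.

-- ===== PORT A =====
-- calcul(l, k, c): ret = 0; for i in range(0, len(l)): ret += l[i] * k**(len(l)-i-1); return ret+1
def calcul (l : List Int) (k : Int) (c : Int) : Int :=
  ((List.range l.length).foldl (fun ret i => ret + l.getD i 0 * k ^ (l.length - i - 1)) 0) + 1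

-- inner 'for i in range(c): tab.append(a.pop(0) if len(a)!=0 else k)'
def fillTabA (k : Int) : Nat → List Int → List Int → List Int × List Int
  | 0, tab, a => (tab, a)
  | n + 1, tab, a =>
    match a with
    | [] => fillTabA k n (tab ++ [k]) []
    | x :: rest => fillTabA k n (tab ++ [x]) rest

-- outer 'while len(a) != 0' loop; fuel = initial length of a (each pass pops ≥ 1 element
-- whenever c ≥ 1, which Pre_ guarantees when the loop runs at all)
def loopA (k c : Int) : Nat → List Int → List Int → List Int
  | 0, _, res => res
  | fuel + 1, a, res =>
    if a = [] then res
    else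
      let p := fillTabA k c.toNat [] a
      loopA k c fuel p.2 (res ++ [calcul p.1 k c])

def fractiles (k : Int) (c : Int) (s : Int) : List Int :=
  if k > s * c then []  -- Python returns the string "IMPOSSIBLE" here (not a list); excluded by Pre_
  else loopA k c k.toNat (PySem.List.pyRange 0 k 1) []

-- ===== PORT B =====
-- while-loop over start = 0, c, 2c, …; fuel = k.toNat bounds the iteration count when c ≥ 1
def loopB (k c P Q : Int) : Nat → Int → List Int → List Int
  | 0, _, res => res
  | fuel + 1, start, res =>
    if start < k then
      let v : Int :=
        if start + c ≤ k then start * P + Q + 1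
        else (PySem.List.pyRange start k 1 ++ List.replicate (c - (k - start)).toNat k).foldl
               (fun v d => v * k + d) 0 + 1
      loopB k c P Q fuel (start + c) (res ++ [v])
    else res

def fractiles_alt (k : Int) (c : Int) (s : Int) : List Int :=
  if k > s * c then []  -- "IMPOSSIBLE" in Python; excluded by Pre_
  else if k ≤ 0 then []
  else
    let P := (List.range c.toNat).foldl (fun (acc : Int) (j : Nat) => acc + k ^ (c.toNat - 1 - j)) 0
    let Q := (List.range c.toNat).foldl (fun (acc : Int) (j : Nat) => acc + (j : Int) * k ^ (c.toNat - 1 - j)) 0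
    loopB k c P Q k.toNat 0 []

-- ===== PRECONDITION & SPEC =====
-- Pre_ excludes (a) k > s*c, where A returns the string "IMPOSSIBLE" instead of a list of ints,
-- and (b) k > 0 with c ≤ 0, where A's while loop never shrinks a and diverges.
def Pre_fractiles (k : Int) (c : Int) (s : Int) : Prop := k ≤ s * c ∧ (0 < k → 0 < c)
instance (k : Int) (c : Int) (s : Int) : Decidable (Pre_fractiles k c s) := by
  unfold Pre_fractiles; infer_instance

def pvWitness_fractiles : Int × Int × Int := (4, 2, 3)

def Spec_fractiles (k : Int) (c : Int) (s : Int) (out : List Int) : Prop := out = fractiles_alt k c s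
instance (k : Int) (c : Int) (s : Int) (out : List Int) : Decidable (Spec_fractiles k c s out) := by
  unfold Spec_fractiles; infer_instance

-- ===== CLAIM (what is proved, stated in full; the proofs are below) =====
def Claim_equal_fractiles : Prop := ∀ (k : Int) (c : Int) (s : Int), Dom_fractiles k c s → Pre_fractiles k c s → Spec_fractiles k c s (fractiles k c s)

-- ===== LEMMAS AND PROOFS =====

-- the inner for-loop pops min(n, |a|) elements and pads with k
lemma fillTabA_spec (k : Int) : ∀ (n : Nat) (tab a : List Int),
    fillTabA k n tab a = (tab ++ a.take n ++ List.replicate (n - a.length) k, a.drop n) := by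
  intro n
  induction n with
  | zero => intro tab a; simp [fillTabA]
  | succ m ih =>
    intro tab a
    cases a with
    | nil => simp [fillTabA, ih, List.replicate_succ]
    | cons x rest => simp [fillTabA, ih]

lemma pyRange_drop (b : Int) : ∀ (n : Nat) (a : Int),
    (PySem.List.pyRange a b 1).drop n = PySem.List.pyRange (a + n) b 1 := by
  intro n
  induction n with
  | zero => intro a; simp
  | succ m ih =>
    intro a
    by_cases h : a < b
    · rw [PySem.List.pyRange_one_cons h, List.drop_succ_cons, ih (a + 1)]
      congr 1
      push_cast
      ring
    · rw [PySem.List.pyRange_one_eq_nil (by omega), PySem.List.pyRange_one_eq_nil (by omega)]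
      simp

-- take of a full chunk
lemma pyRange_take_full (b : Int) : ∀ (n : Nat) (a : Int), a + n ≤ b →
    (PySem.List.pyRange a b 1).take n = PySem.List.pyRange a (a + n) 1 := by
  intro n
  induction n with
  | zero =>
    intro a _
    rw [List.take_zero, PySem.List.pyRange_one_eq_nil (by omega : a + ((0 : Nat) : Int) ≤ a)]
  | succ m ih =>
    intro a hle
    have h1 : a < b := by omega
    have h2 : a + 1 + (m : Int) ≤ b := by omega
    have h3 : a + 1 + (m : Int) = a + ((m + 1 : Nat) : Int) := by push_cast; ring
    have h4 : a < a + ((m + 1 : Nat) : Int) := by omega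
    rw [PySem.List.pyRange_one_cons h1, List.take_succ_cons, ih (a + 1) h2, h3,
      PySem.List.pyRange_one_cons h4]

-- take past the end keeps the whole range
lemma pyRange_take_over (b : Int) (n : Nat) (a : Int) (h : b ≤ a + n) :
    (PySem.List.pyRange a b 1).take n = PySem.List.pyRange a b 1 := by
  refine List.take_of_length_le ?_
  rw [PySem.List.length_pyRange_one]
  omega

-- foldl-accumulated sum over range n is a Finset sum
lemma foldl_range_eq_sum (f : Nat → Int) : ∀ (n : Nat) (init : Int),
    (List.range n).foldl (fun a i => a + f i) init = init + ∑ i ∈ Finset.range n, f i := by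
  intro n
  induction n with
  | zero => intro init; simp
  | succ m ih =>
    intro init
    rw [List.range_succ, List.foldl_append, Finset.sum_range_succ]
    simp [ih]
    ring

-- Horner evaluation equals the positional power sum
lemma horner_eq_sum (k : Int) : ∀ (l : List Int) (v : Int),
    l.foldl (fun v d => v * k + d) v
      = v * k ^ l.length + ∑ i ∈ Finset.range l.length, l.getD i 0 * k ^ (l.length - 1 - i) := by
  intro l
  induction l with
  | nil => intro v; simp
  | cons x t ih =>
    intro v
    rw [List.foldl_cons, ih (v * k + x)]
    simp only [List.length_cons]
    rw [Finset.sum_range_succ']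
    simp only [List.getD_cons_succ, List.getD_cons_zero]
    have hexp : ∀ i : Nat, t.length + 1 - 1 - (i + 1) = t.length - 1 - i := by omega
    have hsum : ∑ i ∈ Finset.range t.length, t.getD i 0 * k ^ (t.length + 1 - 1 - (i + 1))
        = ∑ i ∈ Finset.range t.length, t.getD i 0 * k ^ (t.length - 1 - i) := by
      refine Finset.sum_congr rfl fun i _ => by rw [hexp]
    rw [hsum]
    have h0 : t.length + 1 - 1 - 0 = t.length := by omega
    rw [h0]
    ring

-- A's calcul is Horner + 1
lemma calcul_eq_horner (l : List Int) (k c : Int) :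
    calcul l k c = l.foldl (fun v d => v * k + d) 0 + 1 := by
  unfold calcul
  rw [foldl_range_eq_sum, horner_eq_sum]
  have : ∀ i : Nat, l.length - i - 1 = l.length - 1 - i := by omega
  simp only [this]
  ring

-- value of a full chunk [start, start+1, …, start+n-1] in terms of P and Q
lemma chunk_val (k : Int) : ∀ (n : Nat) (start : Int),
    (PySem.List.pyRange start (start + n) 1).foldl (fun v d => v * k + d) 0
      = start * (∑ j ∈ Finset.range n, k ^ (n - 1 - j))
        + ∑ j ∈ Finset.range n, (j : Int) * k ^ (n - 1 - j) := by
  intro n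
  induction n with
  | zero => intro start; rw [PySem.List.pyRange_one_eq_nil (by omega)]; simp
  | succ m ih =>
    intro start
    have hsplit : PySem.List.pyRange start (start + (m + 1 : Nat)) 1
        = PySem.List.pyRange start (start + m) 1 ++ [start + m] := by
      have : (start + ((m + 1 : Nat) : Int)) = (start + (m : Int)) + 1 := by omega
      rw [this, PySem.List.pyRange_one_succ_right (by omega)]
    rw [hsplit, List.foldl_append, ih start]
    simp only [List.foldl_cons, List.foldl_nil]
    have hP : ∑ j ∈ Finset.range (m + 1), k ^ (m + 1 - 1 - j)
        = k * ∑ j ∈ Finset.range m, k ^ (m - 1 - j) + 1 := by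
      rw [Finset.sum_range_succ, Finset.mul_sum]
      have : ∀ j ∈ Finset.range m, k ^ (m + 1 - 1 - j) = k * k ^ (m - 1 - j) := by
        intro j hj
        rw [Finset.mem_range] at hj
        rw [← pow_succ']
        congr 1
        omega
      rw [Finset.sum_congr rfl this]
      simp
    have hQ : ∑ j ∈ Finset.range (m + 1), (j : Int) * k ^ (m + 1 - 1 - j)
        = k * ∑ j ∈ Finset.range m, (j : Int) * k ^ (m - 1 - j) + m := by
      rw [Finset.sum_range_succ, Finset.mul_sum]
      have : ∀ j ∈ Finset.range m, (j : Int) * k ^ (m + 1 - 1 - j)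
          = k * ((j : Int) * k ^ (m - 1 - j)) := by
        intro j hj
        rw [Finset.mem_range] at hj
        have : k ^ (m + 1 - 1 - j) = k * k ^ (m - 1 - j) := by
          rw [← pow_succ']; congr 1; omega
        rw [this]; ring
      rw [Finset.sum_congr rfl this]
      simp
    rw [hP, hQ]
    ring

-- the two loops agree: A's list a is always the residual range [start, k)
lemma loop_eq (k c P Q : Int) (hc : 0 < c)
    (hP : P = ∑ j ∈ Finset.range c.toNat, k ^ (c.toNat - 1 - j))
    (hQ : Q = ∑ j ∈ Finset.range c.toNat, (j : Int) * k ^ (c.toNat - 1 - j)) :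
    ∀ (fuel : Nat) (start : Int) (res : List Int), (k - start).toNat ≤ fuel →
      loopA k c fuel (PySem.List.pyRange start k 1) res = loopB k c P Q fuel start res := by
  intro fuel
  induction fuel with
  | zero => intro start res _; simp [loopA, loopB]
  | succ m ih =>
    intro start res hfuel
    by_cases h : start < k
    · have hne : PySem.List.pyRange start k 1 ≠ [] := by
        rw [PySem.List.pyRange_one_cons h]; simp
      have hlen : (PySem.List.pyRange start k 1).length = (k - start).toNat :=
        PySem.List.length_pyRange_one start k
      rw [loopA, loopB]
      simp only [if_neg hne, if_pos h]
      rw [fillTabA_spec, pyRange_drop, hlen]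
      have hdropEq : start + (c.toNat : Int) = start + c := by omega
      by_cases hfull : start + c ≤ k
      · rw [pyRange_take_full k c.toNat start (by omega)]
        have hrep : c.toNat - (k - start).toNat = 0 := by omega
        rw [hrep]
        simp only [List.replicate_zero, List.append_nil, List.nil_append]
        rw [if_pos hfull, calcul_eq_horner, chunk_val, ← hP, ← hQ, hdropEq]
        exact ih (start + c) _ (by omega)
      · rw [pyRange_take_over k c.toNat start (by omega)]
        have hrep : c.toNat - (k - start).toNat = (c - (k - start)).toNat := by omega
        rw [hrep]
        simp only [List.nil_append]
        rw [if_neg hfull, calcul_eq_horner, hdropEq]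
        exact ih (start + c) _ (by omega)
    · rw [PySem.List.pyRange_one_eq_nil (by omega)]
      rw [loopA, loopB]
      simp [h]

-- ===== VERDICT (by name: the statement is the Claim_ definition above) =====
theorem fractiles_spec : Claim_equal_fractiles := by
  intro k c s _ hpre
  obtain ⟨hks, hkc⟩ := hpre
  unfold Spec_fractiles fractiles fractiles_alt
  rw [if_neg (by omega), if_neg (by omega)]
  by_cases hk : 0 < k
  · have hc : 0 < c := hkc hk
    rw [if_neg (by omega)]
    exact loop_eq k c _ _ hc
      (by rw [foldl_range_eq_sum]; ring)
      (by rw [foldl_range_eq_sum]; ring)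
      k.toNat 0 [] (by omega)
  · have h0 : k.toNat = 0 := by omega
    rw [if_pos (by omega), h0]
    simp [loopA]
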